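-- pv_equiv track=rewrite | github.com/ywaaag/mathorcup-template | scripts/lib/workflow_audit.py | section_items
-- ===== SOURCE A (Python) =====
-- from typing import Any, Dict, List, Optional, Sequence, Tuple
--
-- def section_items(lines: Sequence[str]) -> List[str]:
--     items: List[str] = []
--     in_code_block = False
--     for raw in lines:
--         stripped = raw.strip()
--         if stripped.startswith("```"):
--             in_code_block = not in_code_block
--             continue
--         if in_code_block or not stripped:
--             continue
--         if stripped.startswith("- "):
--             stripped = stripped[2:].strip()
--         items.append(stripped)
--     return items
-- ===== SOURCE B (Python) =====
-- def section_items(lines):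
--     # Pass 1: split the stripped lines into segments at code-fence lines;
--     # even-indexed segments are outside code blocks.
--     segments = []
--     current = []
--     for raw in lines:
--         stripped = raw.strip()
--         if stripped.startswith("```"):
--             segments.append(current)
--             current = []
--         else:
--             current.append(stripped)
--     segments.append(current)
--     kept = [s for seg in segments[::2] for s in seg if s]
--     # Pass 2: turn "- " list items into their content.
--     return [s[2:].strip() if s.startswith("- ") else s for s in kept]
-- ===== Notes on version B (the rewrite author's own statement) =====
-- stated objective: alternative
-- what changed: A's single fused loop (fence flag + blank skip + item extraction per line) is replaced by a split-filter-map pipeline: split the stripped lines into fence-delimited segments, keep the even-indexed (non-code) segments, drop blanks, then map the '- ' prefix extraction in a separate pass.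
import Mathlib
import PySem

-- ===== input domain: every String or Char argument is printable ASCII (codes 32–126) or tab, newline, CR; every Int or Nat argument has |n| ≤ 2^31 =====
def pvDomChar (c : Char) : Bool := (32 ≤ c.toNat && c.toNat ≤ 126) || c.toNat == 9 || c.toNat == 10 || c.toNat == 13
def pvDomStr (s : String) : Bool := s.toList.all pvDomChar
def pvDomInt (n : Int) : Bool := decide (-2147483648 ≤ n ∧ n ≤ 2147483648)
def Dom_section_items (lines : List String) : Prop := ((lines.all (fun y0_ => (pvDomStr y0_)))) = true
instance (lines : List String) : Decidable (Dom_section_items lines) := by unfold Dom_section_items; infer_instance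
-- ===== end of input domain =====

-- B replaces A's fused flag-driven loop by a different decomposition: split the stripped
-- lines into fence-delimited segments, keep the even-indexed (non-code) segments, filter
-- blanks, then map the "- " item extraction in a separate pass (objective: alternative).

-- ===== PORT A =====
def section_items (lines : List String) : List String :=
  (lines.foldl (fun st raw =>
    let stripped := PySem.Str.strip raw
    if PySem.Str.startswith stripped "```" then (st.1, !st.2)
    else if st.2 || stripped == "" then st
    else
      let stripped := if PySem.Str.startswith stripped "- " then
          PySem.Str.strip (PySem.Str.slice stripped (some 2) none) else stripped
      (st.1 ++ [stripped], st.2)) (([] : List String), false)).1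

-- ===== PORT B =====
-- segments[::2] ported by hand (exact for step 2 from index 0): every second element.
mutual
def pvEvens {α : Type} : List α → List α
  | [] => []
  | x :: xs => x :: pvOdds xs
def pvOdds {α : Type} : List α → List α
  | [] => []
  | _ :: xs => pvEvens xs
end

def section_items_alt (lines : List String) : List String :=
  let st := lines.foldl (fun st raw =>
      let stripped := PySem.Str.strip raw
      if PySem.Str.startswith stripped "```" then (st.1 ++ [st.2], ([] : List String))
      else (st.1, st.2 ++ [stripped])) (([] : List (List String)), ([] : List String))
  let segments := st.1 ++ [st.2]
  let kept := (pvEvens segments).flatMap (fun seg => seg.filter (fun s => s ≠ ""))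
  kept.map (fun s => if PySem.Str.startswith s "- " then
      PySem.Str.strip (PySem.Str.slice s (some 2) none) else s)

-- ===== PRECONDITION & SPEC =====
def Spec_section_items (lines : List String) (out : List String) : Prop := out = section_items_alt lines
instance (lines : List String) (out : List String) : Decidable (Spec_section_items lines out) := by unfold Spec_section_items; infer_instance

-- ===== CLAIM (what is proved, stated in full; the proofs are below) =====
def Claim_equal_section_items : Prop := ∀ (lines : List String), Dom_section_items lines → Spec_section_items lines (section_items lines)

-- ===== LEMMAS AND PROOFS =====

def pvItem (s : String) : String :=
  if PySem.Str.startswith s "- " then PySem.Str.strip (PySem.Str.slice s (some 2) none) else s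

-- A's loop, as structural recursion on the remaining lines, for a given flag.
def pvOut : List String → Bool → List String
  | [], _ => []
  | raw :: rest, b =>
    let s := PySem.Str.strip raw
    if PySem.Str.startswith s "```" then pvOut rest (!b)
    else if b || s == "" then pvOut rest b
    else pvItem s :: pvOut rest b

-- B's first pass, as structural recursion: remaining segments given the current one.
def pvSplit : List String → List String → List (List String)
  | [], cur => [cur]
  | raw :: rest, cur =>
    let s := PySem.Str.strip raw
    if PySem.Str.startswith s "```" then cur :: pvSplit rest []
    else pvSplit rest (cur ++ [s])

def pvG (seg : List String) : List String :=
  (seg.filter (fun s => s ≠ "")).map pvItem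

theorem pvA_foldl (ls : List String) : ∀ (acc : List String) (b : Bool),
    (ls.foldl (fun st raw =>
      let stripped := PySem.Str.strip raw
      if PySem.Str.startswith stripped "```" then (st.1, !st.2)
      else if st.2 || stripped == "" then st
      else
        let stripped := if PySem.Str.startswith stripped "- " then
            PySem.Str.strip (PySem.Str.slice stripped (some 2) none) else stripped
        (st.1 ++ [stripped], st.2)) (acc, b)).1 = acc ++ pvOut ls b := by
  induction ls with
  | nil => intro acc b; simp [pvOut]
  | cons raw rest ih =>
    intro acc b
    simp only [List.foldl_cons, pvOut]
    split_ifs with h1 h2 h3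
    · rw [ih]
    · rw [ih]
    · rw [ih]; simp at h3; simp [pvItem, h3]
    · rw [ih]; simp at h3; simp [pvItem, h3]

theorem pvB_foldl (ls : List String) : ∀ (segs : List (List String)) (cur : List String),
    (ls.foldl (fun st raw =>
      let stripped := PySem.Str.strip raw
      if PySem.Str.startswith stripped "```" then (st.1 ++ [st.2], ([] : List String))
      else (st.1, st.2 ++ [stripped])) (segs, cur)).1
    ++ [(ls.foldl (fun st raw =>
      let stripped := PySem.Str.strip raw
      if PySem.Str.startswith stripped "```" then (st.1 ++ [st.2], ([] : List String))
      else (st.1, st.2 ++ [stripped])) (segs, cur)).2]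
    = segs ++ pvSplit ls cur := by
  induction ls with
  | nil => intro segs cur; simp [pvSplit]
  | cons raw rest ih =>
    intro segs cur
    simp only [List.foldl_cons, pvSplit]
    split_ifs with h1
    · rw [ih]; simp
    · rw [ih]

theorem pvMain (ls : List String) : ∀ (cur : List String),
    (pvEvens (pvSplit ls cur)).flatMap pvG = pvG cur ++ pvOut ls false
    ∧ (pvOdds (pvSplit ls cur)).flatMap pvG = pvOut ls true := by
  induction ls with
  | nil => intro cur; simp [pvSplit, pvEvens, pvOdds, pvOut]
  | cons raw rest ih =>
    intro cur
    simp only [pvSplit, pvOut, Bool.false_or, Bool.true_or, if_true, Bool.not_false]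
    by_cases h1 : PySem.Str.startswith (PySem.Str.strip raw) "```" = true
    · simp only [h1, if_true, pvEvens, pvOdds]
      refine ⟨?_, ?_⟩
      · simp [List.flatMap_cons, (ih []).2]
      · have := (ih []).1
        simp only [pvG, List.filter_nil, List.map_nil, List.nil_append] at this
        simpa using this
    · simp only [h1, if_false, Bool.false_eq_true]
      have he := (ih (cur ++ [PySem.Str.strip raw])).1
      have ho := (ih (cur ++ [PySem.Str.strip raw])).2
      by_cases h2 : PySem.Str.strip raw = ""
      · constructor
        · rw [he]; simp [pvG, h2, List.filter_append]
        · simpa using ho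
      · constructor
        · rw [he]; simp [pvG, h2, List.filter_append, pvItem]
        · simpa using ho

-- ===== VERDICT (by name: the statement is the Claim_ definition above) =====
theorem section_items_spec : Claim_equal_section_items := by
  intro lines _
  unfold Spec_section_items section_items section_items_alt
  rw [pvA_foldl]
  dsimp only
  rw [pvB_foldl lines [] []]
  rw [List.map_flatMap]
  exact ((pvMain lines []).1).symm
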